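-- pv_equiv track=rewrite | github.com/dkphd/GP_Ensembling | giraffe/ops.py | first_uniques_mask
-- ===== SOURCE A (Python) =====
-- def first_uniques_mask(arr):
--     mask = []
--     for index, item in enumerate(arr):
--         if item not in arr[:index]:
--             mask.append(True)
--         else:
--             mask.append(False)
--
--     return mask
-- ===== SOURCE B (Python) =====
-- def first_uniques_mask(arr):
--     first_index = {}
--     for i, item in enumerate(arr):
--         if item not in first_index:
--             first_index[item] = i
--     mask = []
--     for i, item in enumerate(arr):
--         mask.append(first_index[item] == i)
--     return mask
-- ===== Notes on version B (the rewrite author's own statement) =====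
-- stated objective: faster
-- what changed: Replaces A's per-element rescan of the prefix (arr[:index]) with a single pass building a first-occurrence index table, then one comparison pass first_index[item] == i.
import Mathlib
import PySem

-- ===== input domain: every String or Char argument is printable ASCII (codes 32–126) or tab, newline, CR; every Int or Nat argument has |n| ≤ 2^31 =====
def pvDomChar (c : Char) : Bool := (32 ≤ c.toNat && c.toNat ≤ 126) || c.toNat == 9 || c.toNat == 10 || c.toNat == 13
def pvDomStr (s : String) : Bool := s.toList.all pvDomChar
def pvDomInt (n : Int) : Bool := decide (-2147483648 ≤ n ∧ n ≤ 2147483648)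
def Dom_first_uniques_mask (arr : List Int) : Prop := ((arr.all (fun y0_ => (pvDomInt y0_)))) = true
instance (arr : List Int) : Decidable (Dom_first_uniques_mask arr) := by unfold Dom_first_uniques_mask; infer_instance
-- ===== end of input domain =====

-- B replaces A's O(n^2) prefix rescans by an O(n) first-occurrence index table built once, then one comparison pass.

-- ===== PORT A =====
-- for index, item in enumerate(arr): mask.append(item not in arr[:index])
def first_uniques_mask (arr : List Int) : List Bool :=
  (PySem.List.enumerate arr 0).foldl
    (fun mask p =>
      if ¬ (PySem.List.slice arr none (some p.1)).contains p.2 then mask ++ [true]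
      else mask ++ [false])
    []

-- ===== PORT B =====
-- pass 1: build first_index; pass 2: mask.append(first_index[item] == i)
-- (first_index[item] is ported as get? compared to some i; the key is always present by construction)
def first_uniques_mask_alt (arr : List Int) : List Bool :=
  let first_index : PySem.Dict Int Int :=
    (PySem.List.enumerate arr 0).foldl
      (fun d p => if ¬ d.contains p.2 then d.insert p.2 p.1 else d)
      PySem.Dict.empty
  (PySem.List.enumerate arr 0).map (fun p => first_index.get? p.2 == some p.1)

-- ===== PRECONDITION & SPEC =====
def Spec_first_uniques_mask (arr : List Int) (out : List Bool) : Prop := out = first_uniques_mask_alt arr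
instance (arr : List Int) (out : List Bool) : Decidable (Spec_first_uniques_mask arr out) := by unfold Spec_first_uniques_mask; infer_instance

-- ===== CLAIM (what is proved, stated in full; the proofs are below) =====
def Claim_equal_first_uniques_mask : Prop := ∀ (arr : List Int), Dom_first_uniques_mask arr → Spec_first_uniques_mask arr (first_uniques_mask arr)

-- ===== LEMMAS AND PROOFS =====

-- A's append-only fold is the map of its per-element condition.
theorem foldl_append_singleton_map {α β : Type} (f : α → β) :
    ∀ (l : List α) (acc : List β),
      l.foldl (fun m p => m ++ [f p]) acc = acc ++ l.map f := by
  intro l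
  induction l with
  | nil => simp
  | cons x xs ih => intro acc; simp [List.foldl, ih]

-- membership in a prefix is idxOf below the cut (for cuts within the list)
theorem mem_take_iff_idxOf_lt (x : Int) :
    ∀ (xs : List Int) (n : Nat), n ≤ xs.length → (x ∈ xs.take n ↔ xs.idxOf x < n) := by
  intro xs
  induction xs with
  | nil => intro n hn; simp at hn; simp [hn]
  | cons y ys ih =>
    intro n hn
    cases n with
    | zero => simp
    | succ m =>
      by_cases hxy : x = y
      · subst hxy; simp [List.idxOf_cons_self]
      · have hbx : (y == x) = false := by simp [Ne.symm hxy]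
        simp only [List.take_succ_cons, List.mem_cons, List.idxOf_cons, hbx, cond_false]
        rw [ih m (by simpa using hn)]
        constructor
        · rintro (h | h)
          · exact absurd h hxy
          · omega
        · intro h
          right
          omega

-- what B's table lookup returns after folding over an enumeration
theorem build_get? (x : Int) :
    ∀ (xs : List Int) (s : Int) (d : PySem.Dict Int Int),
      ((PySem.List.enumerate xs s).foldl
          (fun d p => if ¬ d.contains p.2 then d.insert p.2 p.1 else d) d).get? x =
        match d.get? x with
        | some v => some v
        | none => if x ∈ xs then some (s + (xs.idxOf x : Int)) else none := by
  intro xs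
  induction xs with
  | nil =>
    intro s d
    simp [PySem.List.enumerate]
    cases d.get? x <;> rfl
  | cons y ys ih =>
    intro s d
    rw [PySem.List.enumerate_cons]
    simp only [List.foldl_cons]
    by_cases hc : d.contains y = true
    · rw [if_neg (by simp [hc]), ih]
      cases hdx : d.get? x with
      | some v => rfl
      | none =>
        have hxy : x ≠ y := by
          intro h; subst h
          rw [PySem.Dict.get?_eq_none_iff_contains] at hdx
          simp [hdx] at hc
        have hbx : (y == x) = false := by simp [Ne.symm hxy]
        simp only [List.mem_cons, List.idxOf_cons, hbx, cond_false]
        by_cases hm : x ∈ ys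
        · simp only [hm, if_pos, or_true]
          congr 1
          push_cast
          ring
        · simp [hm, hxy]
    · rw [if_pos (by simp [hc]), ih, PySem.Dict.get?_insert]
      by_cases hxy : x = y
      · subst hxy
        have hdx : d.get? x = none := by
          rw [PySem.Dict.get?_eq_none_iff_contains]; simpa using hc
        simp [hdx, List.idxOf_cons_self]
      · have hbx : (y == x) = false := by simp [Ne.symm hxy]
        rw [if_neg hxy]
        cases hdx : d.get? x with
        | some v => rfl
        | none =>
          simp only [List.mem_cons, List.idxOf_cons, hbx, cond_false]
          by_cases hm : x ∈ ys
          · simp only [hm, if_pos, or_true]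
            congr 1
            push_cast
            ring
          · simp [hm, hxy]

-- the per-position agreement of the two conditions
theorem cond_agree (arr : List Int) (k : Nat) (hk : k < arr.length) :
    (if ¬ (PySem.List.slice arr none (some ((0:Int) + (k:Int)))).contains arr[k] then true else false)
      = (((PySem.List.enumerate arr 0).foldl
            (fun d p => if ¬ d.contains p.2 then d.insert p.2 p.1 else d)
            PySem.Dict.empty).get? arr[k] == some ((0:Int) + (k:Int))) := by
  rw [build_get?]
  have hmem : arr[k] ∈ arr := List.getElem_mem hk
  simp only [PySem.Dict.get?_empty, hmem, if_pos]
  have hslice : PySem.List.slice arr none (some ((0:Int) + (k:Int))) = arr.take k := by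
    rw [zero_add, PySem.List.slice_to_natCast]
  rw [hslice]
  have hle : arr.idxOf arr[k] ≤ k := by
    have hmt : arr[k] ∈ arr.take (k + 1) := by
      have h2 : k < (arr.take (k+1)).length := by simp; omega
      have := List.getElem_mem h2
      rwa [List.getElem_take] at this
    have := (mem_take_iff_idxOf_lt arr[k] arr (k+1) (by omega)).1 hmt
    omega
  by_cases hm : arr[k] ∈ arr.take k
  · have hlt := (mem_take_iff_idxOf_lt arr[k] arr k (by omega)).1 hm
    have hne : arr.idxOf arr[k] ≠ k := by omega
    simp [hm, hne]
  · have hge : ¬ arr.idxOf arr[k] < k := fun h =>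
      hm ((mem_take_iff_idxOf_lt arr[k] arr k (by omega)).2 h)
    have heq : arr.idxOf arr[k] = k := by omega
    simp [hm, heq]

-- ===== VERDICT (by name: the statement is the Claim_ definition above) =====
theorem first_uniques_mask_spec : Claim_equal_first_uniques_mask := by
  intro arr _
  unfold Spec_first_uniques_mask first_uniques_mask first_uniques_mask_alt
  have hbody : (fun (mask : List Bool) (p : Int × Int) =>
        if ¬ (PySem.List.slice arr none (some p.1)).contains p.2 then mask ++ [true]
        else mask ++ [false])
      = fun mask p =>
          mask ++ [if ¬ (PySem.List.slice arr none (some p.1)).contains p.2 then true else false] := by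
    funext m p
    split <;> rfl
  rw [hbody, foldl_append_singleton_map, List.nil_append]
  apply List.map_congr_left
  intro p hp
  rw [PySem.List.mem_enumerate_iff] at hp
  obtain ⟨k, hk, rfl⟩ := hp
  exact cond_agree arr k hk
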